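-- pv_equiv track=rewrite | github.com/florianBurdairon/algo-complexite | question3.py | place_pawn
-- ===== SOURCE A (Python) =====
-- import math
--
-- def place_pawn(grid, p):
--     width_grid = int(math.sqrt(len(grid)))
--     newgrid = []
--     for i in range (len(grid)):
--         newgrid.append(grid[i])
--     for i in range (len(grid)):
--         if (p[i] != '0'):
--             newgrid[i] = p[i]
--             if (i%width_grid < width_grid-1):
--                 newgrid[i+1] = p[i]
--             if (i%width_grid != 0):
--                 newgrid[i-1] = p[i]
--             if (i>=width_grid):
--                 newgrid[i - width_grid] = p[i]
--             if (i < width_grid*width_grid - width_grid):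
--                 newgrid[i + width_grid] = p[i]
--
--     strgrid = ""
--     for i in range(len(newgrid)):
--         strgrid += newgrid[i]
--     return strgrid
-- ===== SOURCE B (Python) =====
-- import math
--
-- def place_pawn(grid, p):
--     # Gather pass: compute each output cell from its highest-index covering pawn
--     # (A's last write wins = highest writer index), instead of scattering writes
--     # into a mutable copy of the grid.
--     n = len(grid)
--     w = int(math.sqrt(n))
--
--     def cell(j):
--         if j + w < n and p[j + w] != '0':                      # pawn below writes j last
--             return p[j + w]
--         if j + 1 < n and (j + 1) % w != 0 and p[j + 1] != '0':  # right pawn writes its left cell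
--             return p[j + 1]
--         if p[j] != '0':                                        # the pawn itself
--             return p[j]
--         if j >= 1 and (j - 1) % w < w - 1 and p[j - 1] != '0':  # left pawn writes its right cell
--             return p[j - 1]
--         if j >= w and j < w * w and p[j - w] != '0':           # pawn above writes downward
--             return p[j - w]
--         return grid[j]
--
--     return ''.join(cell(j) for j in range(n))
-- ===== Notes on version B (the rewrite author's own statement) =====
-- stated objective: alternative
-- what changed: B replaces A's scatter pass (mutating a copied grid with up to five writes per pawn, last write winning) by a gather pass that computes each output cell directly from its highest-index covering pawn, never mutating a working grid.
import Mathlib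
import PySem

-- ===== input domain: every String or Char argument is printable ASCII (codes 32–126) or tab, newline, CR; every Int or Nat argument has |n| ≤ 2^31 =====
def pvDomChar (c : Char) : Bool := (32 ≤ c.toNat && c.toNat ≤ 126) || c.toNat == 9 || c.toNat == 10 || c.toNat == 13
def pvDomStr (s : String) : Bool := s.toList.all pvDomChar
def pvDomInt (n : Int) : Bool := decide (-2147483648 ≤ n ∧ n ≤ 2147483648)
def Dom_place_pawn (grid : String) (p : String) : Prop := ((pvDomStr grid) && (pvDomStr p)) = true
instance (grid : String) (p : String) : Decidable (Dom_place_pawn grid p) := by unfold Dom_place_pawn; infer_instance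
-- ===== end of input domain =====

-- B computes each output cell directly from its highest-index covering pawn (a gather pass)
-- instead of A's scatter pass mutating a copied grid; return values agree on Pre_.

-- floor square root, the value of int(math.sqrt(n)) on the sizes at hand (shared helper)
def pvSqrt (n : Nat) : Nat :=
  ((List.range (n + 1)).filter (fun k => decide (0 < k) && decide (k * k ≤ n))).length

-- ===== PORT A =====
-- one iteration of A's second loop: the pawn at i scatters its value onto itself and its
-- neighbours (a write past the end of the list is where Python raises; Pre_ excludes those inputs)
def pvStepA (w : Nat) (q : List Char) (g : List Char) (i : Nat) : List Char :=
  if q.getD i '0' ≠ '0' then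
    let c := q.getD i '0'
    let g1 := g.set i c
    let g2 := if i % w < w - 1 then g1.set (i + 1) c else g1
    let g3 := if i % w ≠ 0 then g2.set (i - 1) c else g2
    let g4 := if w ≤ i then g3.set (i - w) c else g3
    if i < w * w - w then g4.set (i + w) c else g4
  else g

def place_pawn (grid : String) (p : String) : String :=
  let l := grid.toList
  let n := l.length
  let w := pvSqrt n
  let q := p.toList
  let newgrid0 := (List.range n).foldl (fun a i => a ++ [l.getD i ' ']) []
  let newgrid := (List.range n).foldl (pvStepA w q) newgrid0
  String.ofList ((List.range newgrid.length).foldl (fun a i => a ++ [newgrid.getD i ' ']) [])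

-- ===== PORT B =====
-- the per-cell gather: candidate writers scanned from the highest index down
def pvCell (w n : Nat) (l q : List Char) (j : Nat) : Char :=
  if j + w < n ∧ q.getD (j + w) '0' ≠ '0' then q.getD (j + w) '0'
  else if j + 1 < n ∧ (j + 1) % w ≠ 0 ∧ q.getD (j + 1) '0' ≠ '0' then q.getD (j + 1) '0'
  else if q.getD j '0' ≠ '0' then q.getD j '0'
  else if 1 ≤ j ∧ (j - 1) % w < w - 1 ∧ q.getD (j - 1) '0' ≠ '0' then q.getD (j - 1) '0'
  else if w ≤ j ∧ j < w * w ∧ q.getD (j - w) '0' ≠ '0' then q.getD (j - w) '0'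
  else l.getD j ' '

def place_pawn_alt (grid : String) (p : String) : String :=
  let l := grid.toList
  let n := l.length
  let w := pvSqrt n
  let q := p.toList
  String.ofList ((List.range n).map (pvCell w n l q))

-- ===== PRECONDITION & SPEC =====
-- Pre_ excludes exactly the inputs where Python A raises an IndexError: p shorter than grid,
-- or the grid's last cell holding a pawn whose right-neighbour write falls off the end.
def Pre_place_pawn (grid : String) (p : String) : Prop :=
  grid.toList.length ≤ p.toList.length ∧
  (grid.toList.length = 0 ∨
    ¬((grid.toList.length - 1) % pvSqrt grid.toList.length < pvSqrt grid.toList.length - 1 ∧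
      p.toList.getD (grid.toList.length - 1) '0' ≠ '0'))
instance (grid : String) (p : String) : Decidable (Pre_place_pawn grid p) := by
  unfold Pre_place_pawn; infer_instance

def pvWitness_place_pawn : String × String := ("0000", "0200")


def Spec_place_pawn (grid : String) (p : String) (out : String) : Prop := out = place_pawn_alt grid p
instance (grid : String) (p : String) (out : String) : Decidable (Spec_place_pawn grid p out) := by
  unfold Spec_place_pawn; infer_instance

-- ===== CLAIM (what is proved, stated in full; the proofs are below) =====
def Claim_equal_place_pawn : Prop := ∀ (grid : String) (p : String), Dom_place_pawn grid p → Pre_place_pawn grid p → Spec_place_pawn grid p (place_pawn grid p)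

-- ===== LEMMAS AND PROOFS =====

theorem pvSqrt_pos (n : Nat) (h : 1 ≤ n) : 1 ≤ pvSqrt n := by
  have h1 : (1 : Nat) ∈ (List.range (n + 1)).filter (fun k => decide (0 < k) && decide (k * k ≤ n)) := by
    simp [List.mem_filter, List.mem_range]; omega
  exact List.length_pos_of_mem h1

-- "pawn i writes cell j" — the write set of one iteration of A's second loop
def pvWrites (w : Nat) (q : List Char) (i j : Nat) : Bool :=
  decide (q.getD i '0' ≠ '0' ∧
    (j = i ∨ (j = i + 1 ∧ i % w < w - 1) ∨ (i = j + 1 ∧ i % w ≠ 0) ∨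
     (i = j + w ∧ w ≤ i) ∨ (j = i + w ∧ i < w * w - w)))

theorem pvWrites_iff (w : Nat) (q : List Char) (i j : Nat) :
    pvWrites w q i j = true ↔
      (q.getD i '0' ≠ '0' ∧
        (j = i ∨ (j = i + 1 ∧ i % w < w - 1) ∨ (i = j + 1 ∧ i % w ≠ 0) ∨
         (i = j + w ∧ w ≤ i) ∨ (j = i + w ∧ i < w * w - w))) := by
  simp [pvWrites]

-- value of cell j after the pawns 0..m-1 have scattered (the last write wins)
def pvLast (w : Nat) (l q : List Char) (j : Nat) : Nat → Char
  | 0 => l.getD j ' '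
  | m + 1 => if pvWrites w q m j then q.getD m '0' else pvLast w l q j m

-- pvCell with the writer indices cut off below m (pvPCell … n equals pvCell for j < n)
def pvPCell (w : Nat) (l q : List Char) (j m : Nat) : Char :=
  if j + w < m ∧ q.getD (j + w) '0' ≠ '0' then q.getD (j + w) '0'
  else if j + 1 < m ∧ (j + 1) % w ≠ 0 ∧ q.getD (j + 1) '0' ≠ '0' then q.getD (j + 1) '0'
  else if j < m ∧ q.getD j '0' ≠ '0' then q.getD j '0'
  else if 1 ≤ j ∧ j - 1 < m ∧ (j - 1) % w < w - 1 ∧ q.getD (j - 1) '0' ≠ '0' then q.getD (j - 1) '0'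
  else if w ≤ j ∧ j - w < m ∧ j < w * w ∧ q.getD (j - w) '0' ≠ '0' then q.getD (j - w) '0'
  else l.getD j ' '

theorem pvGetD_set (g : List Char) (t : Nat) (c : Char) (j : Nat) :
    (g.set t c).getD j ' ' = if t = j ∧ j < g.length then c else g.getD j ' ' := by
  by_cases h1 : t = j
  · subst h1
    by_cases h2 : t < g.length
    · simp [List.getD_eq_getElem?_getD, h2]
    · have hn : g[t]? = none := by rw [List.getElem?_eq_none_iff]; omega
      simp [List.getD_eq_getElem?_getD, h2]
  · simp [List.getD_eq_getElem?_getD, h1]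

theorem pvPCell_succ (w : Nat) (l q : List Char) (j m : Nat) (hw : 1 ≤ w) :
    pvPCell w l q j (m + 1) = if pvWrites w q m j then q.getD m '0' else pvPCell w l q j m := by
  by_cases hW : pvWrites w q m j = true
  · rw [if_pos hW]
    obtain ⟨hq, hd⟩ := (pvWrites_iff w q m j).mp hW
    rcases hd with h | ⟨h, hc⟩ | ⟨h, hc⟩ | ⟨h, hc⟩ | ⟨h, hc⟩
    · -- j = m : self write
      subst h
      rw [pvPCell, if_neg (by rintro ⟨h1, -⟩; omega), if_neg (by rintro ⟨h1, -⟩; omega),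
        if_pos ⟨by omega, hq⟩]
    · -- j = m + 1 : pawn m writes its right neighbour
      subst h
      rw [pvPCell, if_neg (by rintro ⟨h1, -⟩; omega), if_neg (by rintro ⟨h1, -⟩; omega),
        if_neg (by rintro ⟨h1, -⟩; omega),
        if_pos ⟨by omega, by omega, by simpa using hc, by simpa using hq⟩]
      simp
    · -- m = j + 1 : pawn m writes its left neighbour
      by_cases hw1 : w = 1
      · subst hw1; omega
      · have hw2 : 2 ≤ w := by omega
        subst h
        rw [pvPCell, if_neg (by rintro ⟨h1, -⟩; omega), if_pos ⟨by omega, hc, hq⟩]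
    · -- m = j + w : pawn m writes upward
      subst h
      rw [pvPCell, if_pos ⟨by omega, hq⟩]
    · -- j = m + w : pawn m writes downward
      subst h
      rw [pvPCell, if_neg (by rintro ⟨h1, -⟩; omega), if_neg (by rintro ⟨h1, -⟩; omega),
        if_neg (by rintro ⟨h1, -⟩; omega),
        if_neg (by
          rintro ⟨h1, h2, h3, -⟩
          have hww : w = 1 := by omega
          subst hww; simp at h3),
        if_pos ⟨by omega, by omega, by omega, by simpa using hq⟩]
      simp
  · rw [if_neg hW]
    have hW' : ¬(q.getD m '0' ≠ '0' ∧
        (j = m ∨ (j = m + 1 ∧ m % w < w - 1) ∨ (m = j + 1 ∧ m % w ≠ 0) ∨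
         (m = j + w ∧ w ≤ m) ∨ (j = m + w ∧ m < w * w - w))) :=
      fun h => hW ((pvWrites_iff w q m j).mpr h)
    by_cases hq : q.getD m '0' ≠ '0'
    · have hd : ¬(j = m ∨ (j = m + 1 ∧ m % w < w - 1) ∨ (m = j + 1 ∧ m % w ≠ 0) ∨
          (m = j + w ∧ w ≤ m) ∨ (j = m + w ∧ m < w * w - w)) := fun h => hW' ⟨hq, h⟩
      push Not at hd
      obtain ⟨hd1, hd2, hd3, hd4, hd5⟩ := hd
      have e1 : (j + w < m + 1 ∧ q.getD (j + w) '0' ≠ '0') ↔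
          (j + w < m ∧ q.getD (j + w) '0' ≠ '0') := by
        constructor
        · rintro ⟨h1, h2⟩
          refine ⟨?_, h2⟩
          by_contra hge
          have hjw : m = j + w := by omega
          have := hd4 hjw
          omega
        · rintro ⟨h1, h2⟩; exact ⟨by omega, h2⟩
      have e2 : (j + 1 < m + 1 ∧ (j + 1) % w ≠ 0 ∧ q.getD (j + 1) '0' ≠ '0') ↔
          (j + 1 < m ∧ (j + 1) % w ≠ 0 ∧ q.getD (j + 1) '0' ≠ '0') := by
        constructor
        · rintro ⟨h1, h2, h3⟩
          refine ⟨?_, h2, h3⟩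
          by_contra hge
          have hm : m = j + 1 := by omega
          have h0 := hd3 hm
          rw [hm] at h0
          exact h2 h0
        · rintro ⟨h1, h2, h3⟩; exact ⟨by omega, h2, h3⟩
      have e3 : (j < m + 1 ∧ q.getD j '0' ≠ '0') ↔ (j < m ∧ q.getD j '0' ≠ '0') := by
        constructor
        · rintro ⟨h1, h2⟩
          refine ⟨?_, h2⟩
          by_contra hge
          exact hd1 (by omega)
        · rintro ⟨h1, h2⟩; exact ⟨by omega, h2⟩
      have e4 : (1 ≤ j ∧ j - 1 < m + 1 ∧ (j - 1) % w < w - 1 ∧ q.getD (j - 1) '0' ≠ '0') ↔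
          (1 ≤ j ∧ j - 1 < m ∧ (j - 1) % w < w - 1 ∧ q.getD (j - 1) '0' ≠ '0') := by
        constructor
        · rintro ⟨h0, h1, h2, h3⟩
          refine ⟨h0, ?_, h2, h3⟩
          by_contra hge
          have hjm : j = m + 1 := by omega
          have hm := hd2 hjm
          have hj1 : j - 1 = m := by omega
          rw [hj1] at h2
          omega
        · rintro ⟨h0, h1, h2, h3⟩; exact ⟨h0, by omega, h2, h3⟩
      have e5 : (w ≤ j ∧ j - w < m + 1 ∧ j < w * w ∧ q.getD (j - w) '0' ≠ '0') ↔
          (w ≤ j ∧ j - w < m ∧ j < w * w ∧ q.getD (j - w) '0' ≠ '0') := by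
        constructor
        · rintro ⟨h0, h1, h2, h3⟩
          refine ⟨h0, ?_, h2, h3⟩
          by_contra hge
          have hjm : j = m + w := by omega
          have := hd5 hjm
          omega
        · rintro ⟨h0, h1, h2, h3⟩; exact ⟨h0, by omega, h2, h3⟩
      simp only [pvPCell]
      simp only [e1, e2, e3, e4, e5]
    · push Not at hq
      have e1 : ∀ k, (k < m + 1 ∧ q.getD k '0' ≠ '0') ↔ (k < m ∧ q.getD k '0' ≠ '0') := by
        intro k
        constructor
        · rintro ⟨h1, h2⟩
          refine ⟨?_, h2⟩
          by_contra hge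
          have hk : k = m := by omega
          rw [hk] at h2
          exact h2 hq
        · rintro ⟨h1, h2⟩; exact ⟨by omega, h2⟩
      have e2 : ∀ k P, (k < m + 1 ∧ P ∧ q.getD k '0' ≠ '0') ↔ (k < m ∧ P ∧ q.getD k '0' ≠ '0') := by
        intro k P
        constructor
        · rintro ⟨h1, h2, h3⟩
          exact ⟨((e1 k).mp ⟨h1, h3⟩).1, h2, h3⟩
        · rintro ⟨h1, h2, h3⟩; exact ⟨by omega, h2, h3⟩
      have e4 : ∀ k P, (1 ≤ j ∧ k < m + 1 ∧ P ∧ q.getD k '0' ≠ '0') ↔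
          (1 ≤ j ∧ k < m ∧ P ∧ q.getD k '0' ≠ '0') := by
        intro k P
        constructor
        · rintro ⟨h0, h1, h2, h3⟩
          exact ⟨h0, ((e1 k).mp ⟨h1, h3⟩).1, h2, h3⟩
        · rintro ⟨h0, h1, h2, h3⟩; exact ⟨h0, by omega, h2, h3⟩
      have e5 : ∀ k P, (w ≤ j ∧ k < m + 1 ∧ P ∧ q.getD k '0' ≠ '0') ↔
          (w ≤ j ∧ k < m ∧ P ∧ q.getD k '0' ≠ '0') := by
        intro k P
        constructor
        · rintro ⟨h0, h1, h2, h3⟩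
          exact ⟨h0, ((e1 k).mp ⟨h1, h3⟩).1, h2, h3⟩
        · rintro ⟨h0, h1, h2, h3⟩; exact ⟨h0, by omega, h2, h3⟩
      simp only [pvPCell]
      simp only [e1, e2]

theorem pvLast_eq_pcell (w : Nat) (l q : List Char) (j : Nat) (hw : 1 ≤ w) :
    ∀ m, pvLast w l q j m = pvPCell w l q j m := by
  intro m
  induction m with
  | zero => simp [pvLast, pvPCell]
  | succ m ih =>
    simp only [pvLast]
    rw [pvPCell_succ w l q j m hw, ih]

theorem pvStepA_length (w : Nat) (q g : List Char) (i : Nat) :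
    (pvStepA w q g i).length = g.length := by
  unfold pvStepA
  split_ifs <;> simp

theorem pvStepA_getD (w : Nat) (q g : List Char) (i j : Nat) :
    (pvStepA w q g i).getD j ' ' =
      if pvWrites w q i j ∧ j < g.length then q.getD i '0' else g.getD j ' ' := by
  unfold pvStepA
  simp only [pvWrites_iff]
  by_cases hq : q.getD i '0' ≠ '0'
  · rw [if_pos hq]
    have hcond : ((q.getD i '0' ≠ '0' ∧
          (j = i ∨ (j = i + 1 ∧ i % w < w - 1) ∨ (i = j + 1 ∧ i % w ≠ 0) ∨
           (i = j + w ∧ w ≤ i) ∨ (j = i + w ∧ i < w * w - w))) ∧ j < g.length) ↔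
        ((j = i ∨ (j = i + 1 ∧ i % w < w - 1) ∨ (i = j + 1 ∧ i % w ≠ 0) ∨
          (i = j + w ∧ w ≤ i) ∨ (j = i + w ∧ i < w * w - w)) ∧ j < g.length) := by
      tauto
    simp only [hcond]
    split_ifs with c2 c3 c4 c5 <;>
      simp only [pvGetD_set, List.length_set] <;>
      split_ifs <;> first | rfl | omega
  · rw [if_neg hq]
    rw [if_neg (by rintro ⟨⟨h1, -⟩, -⟩; exact hq h1)]

theorem pvFold_length (w : Nat) (q l : List Char) (m : Nat) :
    ((List.range m).foldl (pvStepA w q) l).length = l.length := by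
  induction m with
  | zero => rfl
  | succ m ih => rw [List.range_succ, List.foldl_append, List.foldl_cons, List.foldl_nil,
      pvStepA_length, ih]

theorem pvFold_getD (w : Nat) (q l : List Char) (j : Nat) (hj : j < l.length) :
    ∀ m, ((List.range m).foldl (pvStepA w q) l).getD j ' ' = pvLast w l q j m := by
  intro m
  induction m with
  | zero => rfl
  | succ m ih =>
    rw [List.range_succ, List.foldl_append, List.foldl_cons, List.foldl_nil, pvStepA_getD,
      pvFold_length, ih]
    simp only [pvLast]
    simp [hj]

theorem pvCopy_loop (l : List Char) :
    (List.range l.length).foldl (fun a i => a ++ [l.getD i ' ']) [] = l := by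
  rw [PySem.List.foldl_append_singleton_eq_map]
  apply List.ext_getElem
  · simp
  · intro i h1 h2
    simp only [List.nil_append, List.getElem_map, List.getElem_range]
    exact List.getD_eq_getElem l ' ' (by simpa using h2)

theorem pvCell_eq_pcell (w n : Nat) (l q : List Char) (j : Nat) (hj : j < n) :
    pvPCell w l q j n = pvCell w n l q j := by
  have h1 : j - 1 < n := by omega
  have h2 : j - w < n := by omega
  unfold pvPCell pvCell
  simp only [hj, h1, h2, true_and]

-- ===== VERDICT (by name: the statement is the Claim_ definition above) =====
theorem place_pawn_spec : Claim_equal_place_pawn := by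
  unfold Claim_equal_place_pawn
  intro grid p _ _
  simp only [Spec_place_pawn, place_pawn, place_pawn_alt]
  set l := grid.toList with hl
  set q := p.toList with hq
  set n := l.length with hn
  set w := pvSqrt n with hw
  rw [show (List.range n).foldl (fun a i => a ++ [l.getD i ' ']) [] = l from pvCopy_loop l]
  set F := (List.range n).foldl (pvStepA w q) l with hF
  have hlen : F.length = n := pvFold_length w q l n
  rw [hlen, show (List.range n).foldl (fun a i => a ++ [F.getD i ' ']) [] =
    (List.range F.length).foldl (fun a i => a ++ [F.getD i ' ']) [] from by rw [hlen],
    pvCopy_loop F]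
  congr 1
  apply List.ext_getElem
  · simp [hlen]
  · intro j hjF hjm
    have hjn : j < n := by omega
    have hw1 : 1 ≤ w := pvSqrt_pos n (by omega)
    rw [← List.getD_eq_getElem F ' ' hjF]
    rw [show F.getD j ' ' = pvLast w l q j n from pvFold_getD w q l j (by omega) n]
    rw [pvLast_eq_pcell w l q j hw1 n, pvCell_eq_pcell w n l q j hjn]
    simp
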